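-- pv_equiv track=rewrite | github.com/xs/aoc23 | 13/sol-2.py | get_reflections
-- ===== SOURCE A (Python) =====
-- def get_reflections(line: str):
--     """Given a line, return columns before which a line of reflection may exist."""
--
--     indices = set()
--     for i in range(1, len(line)):
--         normal = reversed(line[:i])
--         reflection = line[i:]
--         if all(p == q for p, q in zip(normal, reflection)):
--             indices.add(i)
--
--     return indices
-- ===== SOURCE B (Python) =====
-- def _zfunc(t):
--     """Z-array of t: z[k] = length of the longest common prefix of t and t[k:] (k >= 1)."""
--     n = len(t)
--     z = [0] * n
--     l, r = 0, 0
--     for k in range(1, n):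
--         v = min(z[k - l], r - k) if k < r else 0
--         while k + v < n and t[v] == t[k + v]:
--             v += 1
--         z[k] = v
--         if k + v > r:
--             l, r = k, k + v
--     return z
--
--
-- def _pal_prefix_halves(s):
--     """All h in 1..len(s)//2 such that s[:2*h] is an even palindrome,
--     read off the Z-array of s + '\0' + s[::-1] in linear time."""
--     n = len(s)
--     z = _zfunc(s + '\0' + s[::-1])
--     return {h for h in range(1, n // 2 + 1) if z[2 * n + 1 - 2 * h] >= h}
--
--
-- def get_reflections(line: str):
--     """Given a line, return columns before which a line of reflection may exist."""
--     n = len(line)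
--     front = _pal_prefix_halves(line)
--     back = {n - h for h in _pal_prefix_halves(line[::-1])}
--     return {i for i in range(1, n) if i in front or i in back}
-- ===== Notes on version B (the rewrite author's own statement) =====
-- stated objective: faster
-- what changed: A tests every split column independently by comparing the reversed prefix against the suffix (O(n) per column); B computes the Z-function (one linear l,r-window scan) of line + NUL + reversed(line) and of its mirror image, and reads every even-palindromic prefix/suffix half - i.e. every reflection column - directly off the two Z-arrays.
import Mathlib
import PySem

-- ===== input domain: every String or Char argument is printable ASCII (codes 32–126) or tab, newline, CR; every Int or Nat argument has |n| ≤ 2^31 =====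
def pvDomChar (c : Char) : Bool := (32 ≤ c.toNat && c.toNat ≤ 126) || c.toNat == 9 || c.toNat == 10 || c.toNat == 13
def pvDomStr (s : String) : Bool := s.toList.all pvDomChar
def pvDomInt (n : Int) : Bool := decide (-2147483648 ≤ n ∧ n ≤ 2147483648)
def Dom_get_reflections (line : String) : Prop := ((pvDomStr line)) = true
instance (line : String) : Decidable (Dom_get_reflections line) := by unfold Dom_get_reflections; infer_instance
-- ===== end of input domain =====

-- B replaces A's per-split O(n) reversed-prefix/suffix comparison by the Z-function
-- (one linear scan each over line + '\0' + reversed(line) and its mirror image), reading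
-- every reflection column off the two Z-arrays (objective: faster, asymptotic).

-- ===== PORT A =====
def get_reflections (line : String) : List Int :=
  let s := line.toList
  (PySem.List.pyRange 1 (s.length : Int) 1).foldl (fun indices i =>
    let normal := (PySem.List.slice s none (some i)).reverse
    let reflection := PySem.List.slice s (some i) none
    if (normal.zip reflection).all (fun pq => pq.1 == pq.2) then
      PySem.Set.add indices i
    else indices) PySem.Set.empty

-- ===== PORT B =====
-- the `while k + v < n and t[v] == t[k + v]: v += 1` loop of _zfunc in Source B,
-- with fuel = len(t) (v is incremented at most len(t) times)
def pvZExtend (t : List Char) (n : Int) (k : Int) : Nat → Int → Int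
  | 0, v => v
  | fuel + 1, v =>
    if k + v < n ∧ PySem.List.pyGetD t v ' ' == PySem.List.pyGetD t (k + v) ' '
    then pvZExtend t n k fuel (v + 1) else v

-- one iteration of the `for k in range(1, n)` loop of _zfunc (state z, l, r)
def pvZstep (t : List Char) (n : Int) (st : List Int × Int × Int) (k : Int) :
    List Int × Int × Int :=
  let z := st.1
  let l := st.2.1
  let r := st.2.2
  let v0 : Int := if k < r then min (PySem.List.pyGetD z (k - l) 0) (r - k) else 0
  let v := pvZExtend t n k t.length v0
  let z' := PySem.List.pySetD z k v
  if k + v > r then (z', k, k + v) else (z', l, r)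

def pvZfunc (t : List Char) : List Int :=
  let n : Int := t.length
  ((PySem.List.pyRange 1 n 1).foldl (pvZstep t n) (List.replicate t.length 0, 0, 0)).1

-- _pal_prefix_halves of Source B; s[::-1] is List.reverse (PySem.List.slice?_none_none_neg_one)
def pvPalPrefixHalves (s : List Char) : List Int :=
  let n : Int := s.length
  let z := pvZfunc (s ++ [Char.ofNat 0] ++ s.reverse)
  (PySem.List.pyRange 1 (PySem.Int.floordiv n 2 + 1) 1).foldl (fun acc h =>
    if PySem.List.pyGetD z (2 * n + 1 - 2 * h) 0 ≥ h then PySem.Set.add acc h else acc)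
    PySem.Set.empty

def get_reflections_alt (line : String) : List Int :=
  let s := line.toList
  let n : Int := s.length
  let front := pvPalPrefixHalves s
  let back := (pvPalPrefixHalves s.reverse).foldl
    (fun acc h => PySem.Set.add acc (n - h)) PySem.Set.empty
  (PySem.List.pyRange 1 n 1).foldl (fun acc i =>
    if PySem.Set.contains front i || PySem.Set.contains back i then
      PySem.Set.add acc i
    else acc) PySem.Set.empty

-- ===== PRECONDITION & SPEC =====
def Spec_get_reflections (line : String) (out : List Int) : Prop := out = get_reflections_alt line
instance (line : String) (out : List Int) : Decidable (Spec_get_reflections line out) := by unfold Spec_get_reflections; infer_instance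

-- ===== CLAIM (what is proved, stated in full; the proofs are below) =====
def Claim_equal_get_reflections : Prop := ∀ (line : String), Dom_get_reflections line → Spec_get_reflections line (get_reflections line)

-- ===== LEMMAS AND PROOFS =====

-- length of the longest common prefix of two lists
def pvLcp : List Char → List Char → Nat
  | a :: as, b :: bs => if a = b then pvLcp as bs + 1 else 0
  | _, _ => 0

-- The condition both programs decide at column i: every offset u < min i (n-i) matches.
def pvGood (s : List Char) (i : Nat) : Prop :=
  ∀ u, u < min i (s.length - i) → s.getD (i - 1 - u) ' ' = s.getD (i + u) ' '

lemma pvGetD_drop (t : List Char) (j u : Nat) :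
    (t.drop j).getD u ' ' = t.getD (j + u) ' ' := by
  rcases Nat.lt_or_ge (j + u) t.length with h | h
  · rw [List.getD_eq_getElem _ _ (by simp; omega), List.getD_eq_getElem _ _ h]
    simp
  · rw [List.getD_eq_default _ _ (by simp; omega), List.getD_eq_default _ _ h]

lemma pvLcp_le_right (a b : List Char) : pvLcp a b ≤ b.length := by
  induction a generalizing b with
  | nil => simp [pvLcp]
  | cons x xs ih =>
    cases b with
    | nil => simp [pvLcp]
    | cons y ys =>
      simp only [pvLcp]; split_ifs <;> simp
      exact ih ys

lemma pvLcp_match (a b : List Char) : ∀ u, u < pvLcp a b → a.getD u ' ' = b.getD u ' ' := by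
  induction a generalizing b with
  | nil => simp [pvLcp]
  | cons x xs ih =>
    cases b with
    | nil => simp [pvLcp]
    | cons y ys =>
      intro u hu
      simp only [pvLcp] at hu
      split_ifs at hu with hxy
      · cases u with
        | zero => simpa using hxy
        | succ u' => simpa using ih ys u' (by omega)
      · omega

lemma pvLcp_stop (a b : List Char) :
    pvLcp a b = a.length ∨ pvLcp a b = b.length ∨
      a.getD (pvLcp a b) ' ' ≠ b.getD (pvLcp a b) ' ' := by
  induction a generalizing b with
  | nil => simp [pvLcp]
  | cons x xs ih =>
    cases b with
    | nil => simp [pvLcp]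
    | cons y ys =>
      simp only [pvLcp]
      split_ifs with hxy
      · rcases ih ys with h | h | h
        · left; simp [h]
        · right; left; simp [h]
        · right; right; simpa using h
      · right; right; simpa using hxy

lemma pvLcp_ge (a b : List Char) (m : Nat) (ha : m ≤ a.length) (hb : m ≤ b.length)
    (h : ∀ u, u < m → a.getD u ' ' = b.getD u ' ') : m ≤ pvLcp a b := by
  induction a generalizing b m with
  | nil => simp at ha; omega
  | cons x xs ih =>
    cases b with
    | nil => simp at hb; omega
    | cons y ys =>
      cases m with
      | zero => omega
      | succ m' =>
        have hxy : x = y := by simpa using h 0 (by omega)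
        simp only [pvLcp, if_pos hxy]
        have := ih ys m' (by simp at ha; omega) (by simp at hb; omega)
          (fun u hu => by simpa using h (u + 1) (by omega))
        omega

-- the while loop computes the exact lcp once started below-or-at it with enough fuel
lemma pvZExtend_eq (t : List Char) (k : Nat) (hk : 1 ≤ k) :
    ∀ (fuel v : Nat), v ≤ pvLcp t (t.drop k) → pvLcp t (t.drop k) ≤ v + fuel →
    pvZExtend t (t.length : Int) (k : Int) fuel (v : Int) = (pvLcp t (t.drop k) : Int) := by
  intro fuel
  induction fuel with
  | zero =>
    intro v hv hf
    have : v = pvLcp t (t.drop k) := by omega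
    simp [pvZExtend, this]
  | succ fuel ih =>
    intro v hv hf
    set L := pvLcp t (t.drop k) with hL
    have hLn : L ≤ t.length - k := by
      have := pvLcp_le_right t (t.drop k); simp at this; omega
    rcases Nat.lt_or_ge v L with hvL | hvL
    · have hkv : (k : Int) + v < (t.length : Int) := by omega
      have hch : PySem.List.pyGetD t (v : Int) ' ' == PySem.List.pyGetD t ((k : Int) + v) ' ' := by
        have hm := pvLcp_match t (t.drop k) v hvL
        rw [pvGetD_drop] at hm
        rw [PySem.List.pyGetD_eq_getElem t ' ' (by omega) (by omega),
            PySem.List.pyGetD_eq_getElem t ' ' (by omega) (by omega)]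
        simp only [beq_iff_eq]
        rw [List.getD_eq_getElem _ _ (by omega), List.getD_eq_getElem _ _ (by omega)] at hm
        convert hm using 2
      rw [show pvZExtend t (t.length : Int) (k : Int) (fuel + 1) (v : Int)
            = pvZExtend t (t.length : Int) (k : Int) fuel ((v : Int) + 1) by
          simp only [pvZExtend, if_pos (And.intro hkv hch)]]
      have := ih (v + 1) (by omega) (by omega)
      push_cast at this ⊢
      exact this
    · have hveq : v = L := by omega
      have hcond : ¬ ((k : Int) + v < (t.length : Int) ∧
          PySem.List.pyGetD t (v : Int) ' ' == PySem.List.pyGetD t ((k : Int) + v) ' ') := by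
        rintro ⟨hkv, hch⟩
        rcases pvLcp_stop t (t.drop k) with h | h | h
        · omega
        · simp at h; omega
        · apply h
          rw [pvGetD_drop]
          rw [PySem.List.pyGetD_eq_getElem t ' ' (by omega) (by omega),
              PySem.List.pyGetD_eq_getElem t ' ' (by omega) (by omega)] at hch
          simp only [beq_iff_eq] at hch
          rw [List.getD_eq_getElem _ _ (by omega), List.getD_eq_getElem _ _ (by omega)]
          convert hch using 2 <;> omega
      subst hveq
      simp only [pvZExtend, if_neg hcond]

-- invariant of the `for k in range(1, n)` loop of _zfunc after processing 1..k-1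
def pvZInv (t : List Char) (k : Nat) (st : List Int × Int × Int) : Prop :=
  st.1.length = t.length ∧
  (∀ j : Nat, 1 ≤ j → j < k → st.1.getD j 0 = (pvLcp t (t.drop j) : Int)) ∧
  (∃ ln rn : Nat, st.2.1 = (ln : Int) ∧ st.2.2 = (rn : Int) ∧ rn ≤ t.length ∧ ln ≤ rn ∧
    (0 < rn → 1 ≤ ln ∧ ln < k ∧ rn - ln ≤ pvLcp t (t.drop ln)))

lemma pvZstep_inv (t : List Char) (k : Nat) (hk1 : 1 ≤ k) (hk2 : k < t.length)
    (st : List Int × Int × Int) (h : pvZInv t k st) :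
    pvZInv t (k + 1) (pvZstep t (t.length : Int) st (k : Int)) := by
  obtain ⟨z, l, r⟩ := st
  obtain ⟨hlen, hz, ln, rn, hl, hr, hrn, hlr, hwin⟩ := h
  simp only at hlen hz
  subst hl hr
  -- the starting value of the while loop is a Nat below the true lcp at k
  have hLn : pvLcp t (t.drop k) ≤ t.length - k := by
    have := pvLcp_le_right t (t.drop k); simp at this; omega
  have hv0 : ∃ v0n : Nat,
      (if (k : Int) < (rn : Int) then
        min (PySem.List.pyGetD z ((k : Int) - (ln : Int)) 0) ((rn : Int) - (k : Int)) else 0)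
        = (v0n : Int) ∧ v0n ≤ pvLcp t (t.drop k) := by
    by_cases hkr : k < rn
    · obtain ⟨hln1, hlnk, hwlcp⟩ := hwin (by omega)
      have hzj : PySem.List.pyGetD z ((k : Int) - (ln : Int)) 0
          = (pvLcp t (t.drop (k - ln)) : Int) := by
        rw [show (k : Int) - (ln : Int) = ((k - ln : Nat) : Int) by omega]
        rw [PySem.List.pyGetD_natCast]
        exact hz (k - ln) (by omega) (by omega)
      refine ⟨min (pvLcp t (t.drop (k - ln))) (rn - k), ?_, ?_⟩
      · rw [if_pos (by omega), hzj]; omega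
      · apply pvLcp_ge
        · omega
        · simp; omega
        · intro u hu
          rw [pvGetD_drop]
          have e1 : t.getD u ' ' = t.getD ((k - ln) + u) ' ' := by
            have := pvLcp_match t (t.drop (k - ln)) u (by omega)
            rwa [pvGetD_drop] at this
          have e2 : t.getD ((k - ln) + u) ' ' = t.getD (k + u) ' ' := by
            have := pvLcp_match t (t.drop ln) ((k - ln) + u) (by omega)
            rw [pvGetD_drop] at this
            rw [this]
            congr 1
            omega
          rw [e1, e2]
    · exact ⟨0, by rw [if_neg (by omega)]; rfl, by omega⟩
  obtain ⟨v0n, hv0eq, hv0le⟩ := hv0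
  have hext : pvZExtend t (t.length : Int) (k : Int) t.length (v0n : Int)
      = (pvLcp t (t.drop k) : Int) :=
    pvZExtend_eq t k hk1 t.length v0n hv0le (by omega)
  simp only [pvZstep, hv0eq, hext]
  set L := pvLcp t (t.drop k) with hLdef
  have hset : PySem.List.pySetD z (k : Int) (L : Int) = z.set k (L : Int) := by
    simp
  have hgetset : ∀ j : Nat, 1 ≤ j → j < k + 1 →
      (z.set k (L : Int)).getD j 0 = (pvLcp t (t.drop j) : Int) := by
    intro j hj1 hj2
    rcases Nat.lt_or_ge j k with hjk | hjk
    · rw [List.getD_eq_getElem _ _ (by simp; omega), List.getElem_set_ne (by omega),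
          ← List.getD_eq_getElem _ _ (by omega)]
      exact hz j hj1 hjk
    · have : j = k := by omega
      subst this
      rw [List.getD_eq_getElem _ _ (by rw [List.length_set]; omega), List.getElem_set_self (by rw [List.length_set]; omega)]
  by_cases hbr : (k : Int) + (L : Int) > (rn : Int)
  · rw [if_pos hbr, hset]
    refine ⟨by simp [hlen], hgetset, k, k + L, by simp, by push_cast; ring, by omega, by omega, ?_⟩
    intro _
    exact ⟨by omega, by omega, by omega⟩
  · rw [if_neg hbr, hset]
    refine ⟨by simp [hlen], hgetset, ln, rn, rfl, rfl, by omega, by omega, ?_⟩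
    intro hrn0
    obtain ⟨a, b, c⟩ := hwin hrn0
    exact ⟨a, by omega, c⟩

lemma pvZfunc_getD (t : List Char) (j : Nat) (h1 : 1 ≤ j) (h2 : j < t.length) :
    (pvZfunc t).getD j 0 = (pvLcp t (t.drop j) : Int) := by
  have aux : ∀ m : Nat, 1 ≤ m → m ≤ t.length →
      pvZInv t m ((PySem.List.pyRange 1 (m : Int) 1).foldl (pvZstep t (t.length : Int))
        (List.replicate t.length 0, 0, 0)) := by
    intro m
    induction m with
    | zero => omega
    | succ m ih =>
      intro _ hm
      rcases Nat.eq_zero_or_pos m with hm0 | hm0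
      · subst hm0
        rw [show ((1 : Nat) : Int) = 1 by norm_num, PySem.List.pyRange_one_eq_nil (by omega)]
        refine ⟨by simp, by omega, 0, 0, rfl, rfl, by omega, by omega, by omega⟩
      · rw [show ((m + 1 : Nat) : Int) = (m : Int) + 1 by push_cast; ring,
            PySem.List.pyRange_one_succ_right (by omega), List.foldl_append]
        simp only [List.foldl_cons, List.foldl_nil]
        exact pvZstep_inv t m hm0 (by omega) _ (ih hm0 (by omega))
  obtain ⟨_, hz, _⟩ := aux t.length (by omega) le_rfl
  simpa [pvZfunc] using hz j h1 h2

-- folding Set.add of fresh elements under a test is filter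
lemma pvFoldl_setadd_filter (p : Int → Prop) [DecidablePred p] (l : List Int) (hl : l.Nodup)
    (acc : List Int) (hd : ∀ x ∈ l, x ∉ acc) :
    l.foldl (fun a x => if p x then PySem.Set.add a x else a) acc
      = acc ++ l.filter (fun x => decide (p x)) := by
  induction l generalizing acc with
  | nil => simp
  | cons x xs ih =>
    rw [List.foldl_cons, List.filter_cons]
    by_cases hp : p x
    · rw [if_pos hp, if_pos (by simpa using hp), PySem.Set.add_of_not_mem (hd x (by simp))]
      rw [ih (List.Nodup.of_cons hl) (acc ++ [x]) (fun y hy hmem => by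
        rcases List.mem_append.mp hmem with h | h
        · exact hd y (by simp [hy]) h
        · simp at h
          subst h
          exact (List.nodup_cons.mp hl).1 hy)]
      simp
    · rw [if_neg hp, if_neg (by simpa using hp)]
      exact ih (List.Nodup.of_cons hl) acc (fun y hy => hd y (by simp [hy]))

-- '2h <= n and z[2n+1-2h] >= h' says: s[:2h] is an even palindrome
lemma pvPal_iff (s : List Char) (h : Nat) (h1 : 1 ≤ h) (h2 : 2 * h ≤ s.length) :
    h ≤ pvLcp (s ++ [Char.ofNat 0] ++ s.reverse)
        ((s ++ [Char.ofNat 0] ++ s.reverse).drop (2 * s.length + 1 - 2 * h)) ↔ pvGood s h := by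
  set n := s.length with hn
  set t := s ++ [Char.ofNat 0] ++ s.reverse with ht
  have hdrop : t.drop (2 * n + 1 - 2 * h) = s.reverse.drop (n - 2 * h) := by
    rw [show 2 * n + 1 - 2 * h = (s ++ [Char.ofNat 0]).length + (n - 2 * h) by simp; omega]
    exact List.drop_length_add_append _
  have hgetT : ∀ u : Nat, u < n → t.getD u ' ' = s.getD u ' ' := by
    intro u hu
    rw [ht, List.append_assoc, List.getD_append _ _ _ _ (by omega)]
  have hgetR : ∀ u : Nat, u < h → (t.drop (2 * n + 1 - 2 * h)).getD u ' ' = s.getD (2 * h - 1 - u) ' ' := by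
    intro u hu
    rw [hdrop, pvGetD_drop]
    rw [List.getD_eq_getElem _ _ (by simp; omega), List.getD_eq_getElem _ _ (by omega)]
    rw [List.getElem_reverse]
    congr 1
    omega
  have hmin : min h (n - h) = h := by omega
  constructor
  · intro hle u hu
    rw [← hn, hmin] at hu
    have hm := pvLcp_match t (t.drop (2 * n + 1 - 2 * h)) (h - 1 - u) (by omega)
    rw [hgetT _ (by omega), hgetR _ (by omega)] at hm
    rw [show h + u = 2 * h - 1 - (h - 1 - u) by omega]
    exact hm
  · intro hg
    apply pvLcp_ge
    · simp [ht]; omega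
    · rw [hdrop]; simp; omega
    · intro u hu
      rw [hgetT _ (by omega), hgetR _ hu]
      have := hg (h - 1 - u) (by rw [← hn, hmin]; omega)
      rw [show h - 1 - (h - 1 - u) = u by omega] at this
      rw [this]
      congr 1
      omega

-- the Z-value test of Source B decides pvGood for the front half
lemma pvMem_palPrefixHalves (s : List Char) (x : Int) :
    x ∈ pvPalPrefixHalves s ↔
      ∃ h : Nat, x = (h : Int) ∧ 1 ≤ h ∧ 2 * h ≤ s.length ∧ pvGood s h := by
  have htlen : (s ++ [Char.ofNat 0] ++ s.reverse).length = 2 * s.length + 1 := by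
    simp; omega
  have hcond : ∀ h : Nat, 1 ≤ h → 2 * h ≤ s.length →
      (PySem.List.pyGetD (pvZfunc (s ++ [Char.ofNat 0] ++ s.reverse))
          (2 * (s.length : Int) + 1 - 2 * (h : Int)) 0 ≥ (h : Int) ↔ pvGood s h) := by
    intro h h1 h2
    rw [show 2 * (s.length : Int) + 1 - 2 * (h : Int) = ((2 * s.length + 1 - 2 * h : Nat) : Int) by omega]
    rw [PySem.List.pyGetD_natCast]
    rw [pvZfunc_getD _ (2 * s.length + 1 - 2 * h) (by omega) (by omega)]
    rw [ge_iff_le, Nat.cast_le]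
    exact pvPal_iff s h h1 h2
  have hfd : PySem.Int.floordiv (s.length : Int) 2 = ((s.length / 2 : Nat) : Int) := by
    exact_mod_cast PySem.Int.floordiv_natCast s.length 2
  simp only [pvPalPrefixHalves]
  rw [pvFoldl_setadd_filter _ _ (PySem.List.nodup_pyRange_one 1 _)
      PySem.Set.empty (by intro y hy hmem; simp [PySem.Set.empty] at hmem)]
  rw [show (PySem.Set.empty : List Int) = [] from rfl, List.nil_append]
  rw [List.mem_filter]
  rw [PySem.List.mem_pyRange_one, hfd]
  simp only [decide_eq_true_eq]
  constructor
  · rintro ⟨⟨hx1, hx2⟩, hp⟩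
    refine ⟨x.toNat, by omega, by omega, by omega, ?_⟩
    rw [← hcond x.toNat (by omega) (by omega)]
    convert hp using 3 <;> omega
  · rintro ⟨h, rfl, h1, h2, hg⟩
    refine ⟨⟨by omega, by omega⟩, ?_⟩
    exact (hcond h h1 h2).mpr hg

lemma pvGood_reverse (s : List Char) (i : Nat) (h1 : 1 ≤ i) (h2 : i < s.length) :
    pvGood s i ↔ pvGood s.reverse (s.length - i) := by
  have hrev : ∀ m : Nat, m < s.length → s.reverse.getD m ' ' = s.getD (s.length - 1 - m) ' ' := by
    intro m hm
    rw [List.getD_eq_getElem _ _ (by simpa using hm), List.getD_eq_getElem _ _ (by omega)]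
    exact List.getElem_reverse _
  constructor
  · intro hg u hu
    simp only [List.length_reverse] at hu
    rw [hrev _ (by omega), hrev _ (by omega)]
    rw [show s.length - 1 - (s.length - i - 1 - u) = i + u by omega,
        show s.length - 1 - (s.length - i + u) = i - 1 - u by omega]
    exact (hg u (by omega)).symm
  · intro hg u hu
    have := hg u (by simp only [List.length_reverse]; omega)
    rw [hrev _ (by omega), hrev _ (by omega),
        show s.length - 1 - (s.length - i - 1 - u) = i + u by omega,
        show s.length - 1 - (s.length - i + u) = i - 1 - u by omega] at this
    exact this.symm

-- A's per-column test (reverse/zip/all over the two halves) decides pvGood.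
lemma condA_iff (s : List Char) (i : Nat) (h1 : 1 ≤ i) (h2 : i < s.length) :
    ((((s.take i).reverse).zip (s.drop i)).all (fun pq => pq.1 == pq.2)) = true ↔ pvGood s i := by
  rw [List.all_eq_true]
  constructor
  · intro h u hu
    have hmem : ((s.take i).reverse[u]'(by simp; omega), (s.drop i)[u]'(by simp; omega)) ∈
        ((s.take i).reverse).zip (s.drop i) := by
      rw [← List.getElem_zip (i := u) (h := by simp; omega)]
      exact List.getElem_mem _
    have := h _ hmem
    simp only [beq_iff_eq] at this
    rw [List.getElem_reverse, List.getElem_take, List.getElem_drop] at this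
    rw [List.getD_eq_getElem s ' ' (by omega), List.getD_eq_getElem s ' ' (by omega)]
    convert this using 2
    simp; omega
  · intro h pq hmem
    obtain ⟨t, ht, rfl⟩ := List.mem_iff_getElem.mp hmem
    have ht' : t < min i (s.length - i) := by simpa using ht
    rw [List.getElem_zip]
    simp only [beq_iff_eq]
    rw [List.getElem_reverse, List.getElem_take, List.getElem_drop]
    have := h t ht'
    rw [List.getD_eq_getElem s ' ' (by omega), List.getD_eq_getElem s ' ' (by omega)] at this
    convert this using 2
    simp; omega

-- B's membership test decides pvGood as well
lemma condB_iff (s : List Char) (i : Nat) (h1 : 1 ≤ i) (h2 : i < s.length) :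
    (PySem.Set.contains (pvPalPrefixHalves s) (i : Int) ||
     PySem.Set.contains ((pvPalPrefixHalves s.reverse).foldl
       (fun acc h => PySem.Set.add acc ((s.length : Int) - h)) PySem.Set.empty) (i : Int)) = true
    ↔ pvGood s i := by
  rw [Bool.or_eq_true, PySem.Set.contains_iff, PySem.Set.contains_iff,
      PySem.Set.mem_foldl_add, pvMem_palPrefixHalves]
  constructor
  · rintro (⟨h, hih, hh1, hh2, hg⟩ | (hmem | ⟨y, hy, hiy⟩))
    · have : i = h := by omega
      subst this
      exact hg
    · simp [PySem.Set.empty] at hmem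
    · obtain ⟨h, rfl, hh1, hh2, hg⟩ := (pvMem_palPrefixHalves s.reverse y).mp hy
      simp only [List.length_reverse] at hh2
      have hieq : i = s.length - h := by omega
      rw [pvGood_reverse s i h1 h2, show s.length - i = h by omega]
      exact hg
  · intro hg
    by_cases hc : 2 * i ≤ s.length
    · exact Or.inl ⟨i, rfl, h1, hc, hg⟩
    · refine Or.inr (Or.inr ⟨((s.length - i : Nat) : Int), ?_, by omega⟩)
      rw [pvMem_palPrefixHalves]
      refine ⟨s.length - i, rfl, by omega, by simp; omega, ?_⟩
      exact (pvGood_reverse s i h1 h2).mp hg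

-- ===== VERDICT (by name: the statement is the Claim_ definition above) =====
theorem get_reflections_spec : Claim_equal_get_reflections := by
  intro line _
  unfold Spec_get_reflections get_reflections get_reflections_alt
  simp only []
  apply Eq.symm
  apply PySem.List.foldl_congr_mem
  intro acc x hx
  rw [PySem.List.mem_pyRange_one] at hx
  obtain ⟨hx1, hx2⟩ := hx
  set s := line.toList with hs
  have hxi : x = ((x.toNat : Nat) : Int) := by omega
  set i : Nat := x.toNat with hidef
  have h1 : 1 ≤ i := by omega
  have h2 : i < s.length := by omega
  rw [hxi]
  rw [PySem.List.slice_to_natCast s i, PySem.List.slice_from_natCast s i]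
  by_cases hc : pvGood s i
  · rw [if_pos ((condA_iff s i h1 h2).mpr hc), if_pos ((condB_iff s i h1 h2).mpr hc)]
  · rw [if_neg, if_neg]
    · intro h; exact hc ((condA_iff s i h1 h2).mp h)
    · intro h; exact hc ((condB_iff s i h1 h2).mp h)
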